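-- pv_equiv track=rewrite | github.com/MrBrantCode/unitest_baseline | mut_generate/mist_train_cf/cf_97268/solution.py | check_valid_words
-- ===== SOURCE A (Python) =====
-- def check_valid_words(words):
--     validWords = {"hello", "world"}  # Replace with a set of valid English words
--
--     uniqueWords = set()
--
--     for word in words:
--         lowercaseWord = word.lower()
--         if lowercaseWord not in uniqueWords:
--             if lowercaseWord in validWords:
--                 uniqueWords.add(lowercaseWord)
--
--     return len(uniqueWords) == len(validWords)
-- ===== SOURCE B (Python) =====
-- def check_valid_words(words):
--     # Two independent short-circuit existence scans; no auxiliary set is built.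
--     return (any(w.lower() == "hello" for w in words)
--             and any(w.lower() == "world" for w in words))
-- ===== Notes on version B (the rewrite author's own statement) =====
-- stated objective: simpler
-- what changed: A maintains a deduplicated seen-set of valid words in one pass and compares its size to the valid set's size; B builds no container at all and instead performs two independent short-circuit existence scans, one per required word.
import Mathlib
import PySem

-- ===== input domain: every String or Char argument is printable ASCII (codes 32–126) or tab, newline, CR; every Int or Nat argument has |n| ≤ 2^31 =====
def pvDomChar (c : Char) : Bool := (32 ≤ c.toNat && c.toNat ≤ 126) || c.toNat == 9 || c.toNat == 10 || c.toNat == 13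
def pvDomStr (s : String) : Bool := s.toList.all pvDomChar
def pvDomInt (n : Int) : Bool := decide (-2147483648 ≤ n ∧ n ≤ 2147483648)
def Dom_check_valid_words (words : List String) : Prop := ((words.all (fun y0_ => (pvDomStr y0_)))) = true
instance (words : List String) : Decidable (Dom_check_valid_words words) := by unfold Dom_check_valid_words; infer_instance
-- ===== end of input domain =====

-- B is simpler: instead of A's seen-set maintained under nested membership guards and
-- compared by size, B builds no container and runs two independent short-circuit
-- existence scans, one per required word.

-- ===== PORT A =====
-- the loop body of A: skip if already seen, add only valid words
def cvwStep (uniqueWords : PySem.Set String) (word : String) : PySem.Set String :=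
  let lowercaseWord := PySem.Str.lower word
  if ¬ (PySem.Set.contains uniqueWords lowercaseWord) then
    if PySem.Set.contains (PySem.Set.ofList ["hello", "world"]) lowercaseWord then
      PySem.Set.add uniqueWords lowercaseWord
    else uniqueWords
  else uniqueWords

def check_valid_words (words : List String) : Bool :=
  let validWords : PySem.Set String := PySem.Set.ofList ["hello", "world"]
  let uniqueWords : PySem.Set String := words.foldl cvwStep PySem.Set.empty
  PySem.Set.len uniqueWords == PySem.Set.len validWords

-- ===== PORT B =====
def check_valid_words_alt (words : List String) : Bool :=
  (words.any (fun w => PySem.Str.lower w == "hello"))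
    && (words.any (fun w => PySem.Str.lower w == "world"))

-- ===== PRECONDITION & SPEC =====
def Spec_check_valid_words (words : List String) (out : Bool) : Prop := out = check_valid_words_alt words
instance (words : List String) (out : Bool) : Decidable (Spec_check_valid_words words out) := by unfold Spec_check_valid_words; infer_instance

-- ===== CLAIM (what is proved, stated in full; the proofs are below) =====
def Claim_equal_check_valid_words : Prop := ∀ (words : List String), Dom_check_valid_words words → Spec_check_valid_words words (check_valid_words words)

-- ===== LEMMAS AND PROOFS =====

theorem cvwStep_eq (acc : PySem.Set String) (w : String) :
    cvwStep acc w =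
      if PySem.Str.lower w ∈ acc then acc
      else if PySem.Str.lower w = "hello" ∨ PySem.Str.lower w = "world"
        then PySem.Set.add acc (PySem.Str.lower w) else acc := by
  unfold cvwStep
  simp [PySem.Set.contains, PySem.Set.mem_ofList]

theorem cvw_mem_foldl (words : List String) (acc : PySem.Set String) (x : String) :
    x ∈ words.foldl cvwStep acc ↔
      x ∈ acc ∨ ((x = "hello" ∨ x = "world") ∧ x ∈ words.map PySem.Str.lower) := by
  induction words generalizing acc with
  | nil => simp
  | cons w ws ih =>
    simp only [List.foldl_cons, List.map_cons, List.mem_cons]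
    rw [cvwStep_eq]
    by_cases hmem : PySem.Str.lower w ∈ acc
    · rw [if_pos hmem, ih]
      by_cases hx : x = PySem.Str.lower w
      · subst hx; simp [hmem]
      · simp [hx]
    · rw [if_neg hmem]
      by_cases hval : PySem.Str.lower w = "hello" ∨ PySem.Str.lower w = "world"
      · rw [if_pos hval, ih, PySem.Set.mem_add]
        by_cases hx : x = PySem.Str.lower w
        · subst hx; simp only [or_true, true_or, and_true]; tauto
        · simp [hx]
      · rw [if_neg hval, ih]
        by_cases hx : x = PySem.Str.lower w
        · subst hx; simp only [true_or, and_true]; tauto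
        · simp [hx]

theorem cvw_nodup_foldl (words : List String) (acc : PySem.Set String) (h : acc.Nodup) :
    (words.foldl cvwStep acc).Nodup := by
  induction words generalizing acc with
  | nil => exact h
  | cons w ws ih =>
    apply ih
    rw [cvwStep_eq]
    split_ifs <;> first | exact PySem.Set.nodup_add _ _ h | exact h

theorem nodup_len_le_one (l : List String) (a : String) (hn : l.Nodup)
    (h : ∀ x ∈ l, x = a) : l.length ≤ 1 := by
  match l with
  | [] => simp
  | [x] => simp
  | x :: y :: t =>
    exfalso
    have hx := h x (by simp)
    have hy := h y (by simp)
    subst hx; subst hy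
    simp at hn

theorem cvw_length_iff (words : List String) :
    (words.foldl cvwStep PySem.Set.empty).length = 2 ↔
      ("hello" ∈ words.map PySem.Str.lower ∧ "world" ∈ words.map PySem.Str.lower) := by
  set L := words.foldl cvwStep PySem.Set.empty with hL
  have hmem : ∀ x, x ∈ L ↔ (x = "hello" ∨ x = "world") ∧ x ∈ words.map PySem.Str.lower := by
    intro x
    rw [hL, cvw_mem_foldl]
    simp [PySem.Set.empty]
  have hnd : L.Nodup := cvw_nodup_foldl words _ (by simp [PySem.Set.empty])
  constructor
  · intro hlen
    by_contra hc
    push_cast at hc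
    have hone : ∃ a : String, ∀ x ∈ L, x = a := by
      by_cases hh : "hello" ∈ words.map PySem.Str.lower
      · have hw : "world" ∉ words.map PySem.Str.lower := by tauto
        exact ⟨"hello", fun x hx => by
          rcases (hmem x).1 hx with ⟨hv | hv, hm⟩
          · exact hv
          · exact absurd (hv ▸ hm) hw⟩
      · exact ⟨"world", fun x hx => by
          rcases (hmem x).1 hx with ⟨hv | hv, hm⟩
          · exact absurd (hv ▸ hm) hh
          · exact hv⟩
    obtain ⟨a, ha⟩ := hone
    have := nodup_len_le_one L a hnd ha
    omega
  · rintro ⟨hh, hw⟩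
    have hperm : L.Perm ["hello", "world"] := by
      rw [List.perm_ext_iff_of_nodup hnd (by decide)]
      intro x
      rw [hmem]
      constructor
      · rintro ⟨hv, _⟩; simpa using hv
      · intro hx
        simp only [List.mem_cons, List.not_mem_nil, or_false] at hx
        rcases hx with hx | hx <;> subst hx
        · exact ⟨Or.inl rfl, hh⟩
        · exact ⟨Or.inr rfl, hw⟩
    simpa using hperm.length_eq

-- ===== VERDICT (by name: the statement is the Claim_ definition above) =====
theorem check_valid_words_spec : Claim_equal_check_valid_words := by
  intro words _
  unfold Spec_check_valid_words check_valid_words check_valid_words_alt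
  rw [Bool.eq_iff_iff]
  have hbeq : (PySem.Set.len (words.foldl cvwStep PySem.Set.empty) ==
        PySem.Set.len (PySem.Set.ofList (["hello", "world"] : List String))) = true ↔
      (words.foldl cvwStep PySem.Set.empty).length = 2 := by
    rw [beq_iff_eq]
    have : PySem.Set.ofList (["hello", "world"] : List String) = ["hello", "world"] := by decide
    rw [this]
    simp only [PySem.Set.len, List.length_cons, List.length_nil]
    omega
  rw [hbeq, cvw_length_iff]
  constructor
  · rintro ⟨hh, hw⟩
    simp only [List.mem_map] at hh hw
    obtain ⟨a, ha, ha2⟩ := hh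
    obtain ⟨b, hb, hb2⟩ := hw
    simp only [Bool.and_eq_true, List.any_eq_true]
    exact ⟨⟨a, ha, by simp [ha2]⟩, ⟨b, hb, by simp [hb2]⟩⟩
  · intro h
    simp only [Bool.and_eq_true, List.any_eq_true, beq_iff_eq] at h
    obtain ⟨⟨a, ha, ha2⟩, ⟨b, hb, hb2⟩⟩ := h
    exact ⟨List.mem_map.2 ⟨a, ha, ha2⟩, List.mem_map.2 ⟨b, hb, hb2⟩⟩
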